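-- pv_equiv track=rewrite | github.com/jjjjgyj/INFO5100Spring2022 | Final/INFO5100 - Final.py | sum_to_zero
-- ===== SOURCE A (Python) =====
-- def sum_to_zero(n):
--     res = []
--     pairs = n // 2
--     for i in range(1, pairs + 1):
--         res.append(i)
--         res.append(-i)
--     if n % 2 != 0:
--         res.append(0)
--
--     return res
-- ===== SOURCE B (Python) =====
-- def sum_to_zero(n):
--     # Per-index construction: slot k holds +(k//2+1) if k even, -(k//2+1) if k odd,
--     # and the final slot of an odd-length list holds 0.
--     out = []
--     for k in range(n):
--         if n % 2 != 0 and k == n - 1: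
--             out.append(0)
--         elif k % 2 == 0:
--             out.append(k // 2 + 1)
--         else:
--             out.append(-(k // 2 + 1))
--     return out
-- ===== Notes on version B (the rewrite author's own statement) =====
-- stated objective: alternative
-- what changed: B computes each output element directly from its index in a single pass over range(n) (magnitude from halving the index, sign from its parity, zero in the final slot when n is odd) instead of looping over the pair count and appending a positive/negative pair per iteration.
-- intended difference: For negative odd n A returns the singleton list containing zero (Python's negative modulo makes the odd-tail append fire although no list of negative length exists); B returns the empty list, which is the intended value for a non-positive count. — e.g. on sum_to_zero(-3): A returns [0], B returns []
import Mathlib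
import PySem

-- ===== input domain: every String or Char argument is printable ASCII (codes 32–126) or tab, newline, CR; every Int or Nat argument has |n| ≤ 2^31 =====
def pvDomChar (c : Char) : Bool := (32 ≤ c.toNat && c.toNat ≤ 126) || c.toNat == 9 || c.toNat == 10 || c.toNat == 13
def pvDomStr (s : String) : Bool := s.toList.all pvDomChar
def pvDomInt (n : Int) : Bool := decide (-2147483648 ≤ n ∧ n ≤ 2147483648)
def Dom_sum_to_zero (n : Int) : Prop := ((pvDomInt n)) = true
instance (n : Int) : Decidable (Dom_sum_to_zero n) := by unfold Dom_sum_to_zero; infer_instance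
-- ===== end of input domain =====

-- B builds each element from its index in one pass; A appends a pair per iteration.

-- ===== PORT A =====
def sum_to_zero (n : Int) : List Int :=
  let pairs := PySem.Int.floordiv n 2
  let res := (PySem.List.pyRange 1 (pairs + 1) 1).foldl (fun r i => (r ++ [i]) ++ [-i]) []
  if PySem.Int.mod n 2 ≠ 0 then res ++ [0] else res

-- ===== PORT B =====
def sum_to_zero_alt (n : Int) : List Int :=
  (PySem.List.pyRange 0 n 1).foldl (fun r k =>
    r ++ [if PySem.Int.mod n 2 ≠ 0 ∧ k = n - 1 then 0
          else if PySem.Int.mod k 2 = 0 then PySem.Int.floordiv k 2 + 1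
          else -(PySem.Int.floordiv k 2 + 1)]) []

-- ===== PRECONDITION & SPEC =====
-- For negative odd n A returns [0] (Python's negative modulo makes the odd-tail append
-- fire although no list of negative length exists); B returns [], the intended value
-- for a non-positive count.
def D_sum_to_zero (n : Int) : Prop := n < 0 ∧ ¬ (2 ∣ n)
instance (n : Int) : Decidable (D_sum_to_zero n) := by unfold D_sum_to_zero; infer_instance

def Spec_sum_to_zero (n : Int) (out : List Int) : Prop := ¬ D_sum_to_zero n → out = sum_to_zero_alt n
instance (n : Int) (out : List Int) : Decidable (Spec_sum_to_zero n out) := by unfold Spec_sum_to_zero; infer_instance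

def pvDiffWitness_sum_to_zero : Int := (-3)
def pvDiffWitnessOut_sum_to_zero : (List Int) × (List Int) := ([0], [])

-- ===== CLAIM (what is proved, stated in full; the proofs are below) =====
def Claim_unchanged_sum_to_zero : Prop := ∀ (n : Int), Dom_sum_to_zero n → Spec_sum_to_zero n (sum_to_zero n)
def Claim_changed_sum_to_zero : Prop := Dom_sum_to_zero (pvDiffWitness_sum_to_zero) ∧ D_sum_to_zero (pvDiffWitness_sum_to_zero) ∧ sum_to_zero (pvDiffWitness_sum_to_zero) = pvDiffWitnessOut_sum_to_zero.1 ∧ sum_to_zero_alt (pvDiffWitness_sum_to_zero) = pvDiffWitnessOut_sum_to_zero.2 ∧ pvDiffWitnessOut_sum_to_zero.1 ≠ pvDiffWitnessOut_sum_to_zero.2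
def Claim_exact_sum_to_zero : Prop := ∀ (n : Int), Dom_sum_to_zero n → D_sum_to_zero n → sum_to_zero n ≠ sum_to_zero_alt n

-- ===== LEMMAS AND PROOFS =====

-- B's per-index body, with n fixed.
def pvBodyB (n k : Int) : Int :=
  if PySem.Int.mod n 2 ≠ 0 ∧ k = n - 1 then 0
  else if PySem.Int.mod k 2 = 0 then PySem.Int.floordiv k 2 + 1
  else -(PySem.Int.floordiv k 2 + 1)

theorem sum_to_zero_alt_eq_map (n : Int) :
    sum_to_zero_alt n = (PySem.List.pyRange 0 n 1).map (pvBodyB n) := by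
  unfold sum_to_zero_alt pvBodyB
  rw [PySem.List.foldl_append_singleton_eq_map]
  simp

theorem pvFoldlPair (l : List Int) (acc : List Int) :
    l.foldl (fun r i => (r ++ [i]) ++ [-i]) acc = acc ++ l.flatMap (fun i => [i, -i]) := by
  induction l generalizing acc with
  | nil => simp
  | cons x xs ih =>
      simp only [List.foldl_cons, ih, List.flatMap_cons]
      simp

theorem sum_to_zero_eq_flatMap (n : Int) :
    sum_to_zero n =
      ((PySem.List.pyRange 1 (PySem.Int.floordiv n 2 + 1) 1).flatMap (fun i => [i, -i])) ++
      (if PySem.Int.mod n 2 ≠ 0 then [0] else []) := by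
  simp only [sum_to_zero, pvFoldlPair, List.nil_append]
  split <;> simp

-- pvBodyB at the two indices 2m and 2m+1 for n ≥ 2m+2 (neither is the odd tail slot).
theorem pvBodyB_even (n : Int) (m : Int) (_hm : 0 ≤ m) (hn : 2*m + 1 < n) :
    pvBodyB n (2*m) = m + 1 := by
  unfold pvBodyB
  rw [PySem.Int.mod_eq_emod_of_pos (by norm_num),
      PySem.Int.mod_eq_emod_of_pos (by norm_num),
      PySem.Int.floordiv_eq_ediv_of_pos (by norm_num)]
  have h1 : ¬ (n % 2 ≠ 0 ∧ 2*m = n - 1) := by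
    rintro ⟨-, h⟩; omega
  rw [if_neg h1, if_pos (by omega), show 2*m/2 = m by omega]

theorem pvBodyB_odd (n : Int) (m : Int) (_hm : 0 ≤ m) (_hn : 2*m + 1 < n) :
    pvBodyB n (2*m + 1) = -(m + 1) := by
  unfold pvBodyB
  rw [PySem.Int.mod_eq_emod_of_pos (by norm_num),
      PySem.Int.mod_eq_emod_of_pos (by norm_num),
      PySem.Int.floordiv_eq_ediv_of_pos (by norm_num)]
  have h1 : ¬ (n % 2 ≠ 0 ∧ 2*m + 1 = n - 1) := by omega
  have h2 : (2*m + 1) % 2 = 1 := by omega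
  have h3 : (2*m + 1) / 2 = m := by omega
  rw [if_neg h1, if_neg (by omega), h3]

-- Core: the pair list of A equals B's map over the first 2p indices, provided n ≥ 2p+1
-- (so none of those indices is the odd tail slot).
theorem pairs_eq_map (n : Int) (p : Nat) (hn : 2*(p : Int) ≤ n) :
    (PySem.List.pyRange 1 ((p : Int) + 1) 1).flatMap (fun i => [i, -i]) =
      (PySem.List.pyRange 0 (2*(p : Int)) 1).map (pvBodyB n) := by
  induction p with
  | zero => simp [PySem.List.pyRange_one_eq_nil]
  | succ q ih =>
    have hq : 2*(q : Int) ≤ n := by push_cast at hn ⊢; omega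
    have e1 : PySem.List.pyRange 1 ((q : Int) + 1 + 1) 1 =
        PySem.List.pyRange 1 ((q : Int) + 1) 1 ++ [(q : Int) + 1] :=
      PySem.List.pyRange_one_succ_right (by omega)
    have e2 : PySem.List.pyRange 0 (2*(q : Int) + 1 + 1) 1 =
        PySem.List.pyRange 0 (2*(q : Int) + 1) 1 ++ [2*(q : Int) + 1] :=
      PySem.List.pyRange_one_succ_right (by omega)
    have e3 : PySem.List.pyRange 0 (2*(q : Int) + 1) 1 =
        PySem.List.pyRange 0 (2*(q : Int)) 1 ++ [2*(q : Int)] :=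
      PySem.List.pyRange_one_succ_right (by omega)
    have hb1 : pvBodyB n (2*(q : Int)) = (q : Int) + 1 :=
      pvBodyB_even n q (by positivity) (by push_cast at hn ⊢; omega)
    have hb2 : pvBodyB n (2*(q : Int) + 1) = -((q : Int) + 1) :=
      pvBodyB_odd n q (by positivity) (by push_cast at hn ⊢; omega)
    push_cast
    rw [show (q : Int) + 1 + 1 = (q : Int) + 1 + 1 from rfl, e1,
        show 2*((q : Int) + 1) = 2*(q : Int) + 1 + 1 by ring, e2, e3]
    simp only [List.flatMap_append, List.map_append, ih hq, List.flatMap_cons,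
      List.flatMap_nil, List.map_cons, List.map_nil, hb1, hb2]
    simp

theorem pvBodyB_tail (n : Int) (h : PySem.Int.mod n 2 ≠ 0) : pvBodyB n (n - 1) = 0 := by
  unfold pvBodyB
  rw [if_pos ⟨h, rfl⟩]

-- ===== VERDICT (by name: the statement is the Claim_ definition above) =====
theorem sum_to_zero_spec : Claim_unchanged_sum_to_zero := by
  intro n _ hD
  rw [sum_to_zero_eq_flatMap, sum_to_zero_alt_eq_map]
  have hmod : PySem.Int.mod n 2 = n % 2 := PySem.Int.mod_eq_emod_of_pos (by norm_num)
  have hdiv : PySem.Int.floordiv n 2 = n / 2 := PySem.Int.floordiv_eq_ediv_of_pos (by norm_num)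
  by_cases hneg : n < 0
  · -- negative: not in D_, so n is even and both sides are empty
    have heven : 2 ∣ n := by
      by_contra h2
      exact hD ⟨hneg, h2⟩
    have hm0 : n % 2 = 0 := by omega
    have e1 : PySem.List.pyRange 1 (PySem.Int.floordiv n 2 + 1) 1 = [] :=
      PySem.List.pyRange_one_eq_nil (by rw [hdiv]; omega)
    have e2 : PySem.List.pyRange 0 n 1 = [] := PySem.List.pyRange_one_eq_nil (by omega)
    rw [e1, e2]
    simp [hm0]
  · rcases Int.even_or_odd n with ⟨m, hm⟩ | ⟨m, hm⟩
    · -- n = 2m even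
      obtain ⟨p, hpN⟩ := Int.eq_ofNat_of_zero_le (show 0 ≤ m by omega)
      rw [show n = 2*(p : Int) by omega]
      have hm0 : (2*(p : Int)) % 2 = 0 := by omega
      have hcore := pairs_eq_map (2*(p : Int)) p (le_refl _)
      rw [show PySem.Int.floordiv (2*(p : Int)) 2 = (p : Int) by
            rw [PySem.Int.floordiv_eq_ediv_of_pos (by norm_num)]; omega]
      rw [PySem.Int.mod_eq_emod_of_pos (by norm_num)]
      simp [hm0, hcore]
    · -- n = 2m + 1 odd
      obtain ⟨p, hpN⟩ := Int.eq_ofNat_of_zero_le (show 0 ≤ m by omega)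
      rw [show n = 2*(p : Int) + 1 by omega]
      have hm1 : (2*(p : Int) + 1) % 2 = 1 := by omega
      have hcore := pairs_eq_map (2*(p : Int) + 1) p (by omega)
      have hsplit : PySem.List.pyRange 0 (2*(p : Int) + 1) 1 =
          PySem.List.pyRange 0 (2*(p : Int)) 1 ++ [2*(p : Int)] :=
        PySem.List.pyRange_one_succ_right (by omega)
      have htail : pvBodyB (2*(p : Int) + 1) (2*(p : Int)) = 0 := by
        have := pvBodyB_tail (2*(p : Int) + 1)
          (by rw [PySem.Int.mod_eq_emod_of_pos (by norm_num), hm1]; norm_num)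
        simpa using this
      rw [show PySem.Int.floordiv (2*(p : Int) + 1) 2 = (p : Int) by
            rw [PySem.Int.floordiv_eq_ediv_of_pos (by norm_num)]; omega]
      rw [PySem.Int.mod_eq_emod_of_pos (by norm_num), hsplit]
      simp [hm1, hcore, htail]

theorem sum_to_zero_changed : Claim_changed_sum_to_zero := by
  unfold Claim_changed_sum_to_zero; decide

theorem sum_to_zero_tight : Claim_exact_sum_to_zero := by
  intro n _ ⟨hneg, hodd⟩
  have hm1 : n % 2 = 1 ∨ n % 2 = -1 := by omega
  have hm1' : n % 2 = 1 := by
    rcases hm1 with h | h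
    · exact h
    · exfalso; have := Int.emod_nonneg n (by norm_num : (2:Int) ≠ 0); omega
  rw [sum_to_zero_eq_flatMap, sum_to_zero_alt_eq_map]
  have hmod : PySem.Int.mod n 2 = n % 2 := PySem.Int.mod_eq_emod_of_pos (by norm_num)
  have hdiv : PySem.Int.floordiv n 2 = n / 2 := PySem.Int.floordiv_eq_ediv_of_pos (by norm_num)
  have e1 : PySem.List.pyRange 1 (PySem.Int.floordiv n 2 + 1) 1 = [] :=
    PySem.List.pyRange_one_eq_nil (by rw [hdiv]; omega)
  have e2 : PySem.List.pyRange 0 n 1 = [] := PySem.List.pyRange_one_eq_nil (by omega)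
  rw [e1, e2]
  simp [hm1']
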